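/- GENERATED by farm/mkstatement.py from design/units.tsv (unit `DGifCloseFile.3`) and the assertions of Gif/Spec/Seg_DGifCloseFile.lean — do not edit.
   THE STATEMENT of the proof unit `DGifCloseFile.3`: segment 3 of `DGifCloseFile` (9 instructions; entries 0x109cdd;
   exits 0x109d06; ranges 0x109cdd-0x109d06)
   takes each of its entry assertions to one of its exit assertions (`Gif.Spec.DGifCloseFile.Seg3`), given the contracts of its callees.
   What the names mean: ProgX/Base/Spec/Basic.lean (the shared hypotheses), Gif/Spec/Seg_DGifCloseFile.lean (the assertions). The theorem to prove:
   `theorem DGifCloseFile_3_ok : Gif.Spec.DGifCloseFile_3.Statement`. -/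
import Gif.Code
import Gif.Dec.All
import Gif.Labels
import Gif.Spec.Alloc
import Gif.Spec.Seg_DGifCloseFile
namespace Gif.Spec.DGifCloseFile_3
open X86 X86.User Asan

/-- The statement of unit `DGifCloseFile.3`. -/
def Statement : Prop :=
  ∀ (Lay : Layout) (_hLay : Lay.hi = 0x1000000) (μ : Microarch) (_hμ : UserX.MicroOK μ) (u₀ : State)
    (_hcode : HasCodeNat Lay u₀ Gif.L.DGifCloseFile.entry Gif.Code.code_DGifCloseFile.nat Gif.L.DGifCloseFile.size)
    (_h_asan_load8_noabort : Asan.SmallCheck Lay μ ProgX.Base.WayInv (ProgX.Base.CodeOK u₀) [.rax, .rcx, .rdx] 8 ProgX.Base.L.__asan_load8_noabort.entry)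
    (_h_GifFreeSavedImages : ∀ (H : Heap) (rest : List Obj) (frames : List (Nat × FrameLayout)) (F : Forest) (R : Rd), Calls Lay μ ProgX.Base.WayInv (ProgX.Base.conv u₀) Gif.L.GifFreeSavedImages.entry (Gif.Spec.GifFreeSavedImages.spec H rest frames F R))
    (_h_asan_store8_noabort : Asan.SmallCheck Lay μ ProgX.Base.WayInv (ProgX.Base.CodeOK u₀) [.rax, .rcx, .rdx] 8 ProgX.Base.L.__asan_store8_noabort.entry),
    Gif.Spec.DGifCloseFile.Seg3 Lay μ u₀

end Gif.Spec.DGifCloseFile_3
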